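-- pv_equiv track=rewrite | github.com/DuvNguyen/SudokuProject | testing.py | handle_mouse_events
-- ===== SOURCE A (Python) =====
-- CELL_SIZE = 100
--
-- GRID_SIZE = 9
--
-- def handle_mouse_events(mouse_pos, fixed_cells):
--     mouse_x, mouse_y = mouse_pos
--     grid_x = mouse_x // CELL_SIZE
--     grid_y = mouse_y // CELL_SIZE
--
--     if 0 <= grid_x < GRID_SIZE and 0 <= grid_y < GRID_SIZE:
--         if (grid_y, grid_x) not in fixed_cells:
--             # Đổ màu xám cho các ô cùng hàng, cột và ô 3x3
--             highlight_cells = set()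
--             for i in range(GRID_SIZE):
--                 highlight_cells.add((grid_y, i))  # Cùng hàng
--                 highlight_cells.add((i, grid_x))  # Cùng cột
--
--             start_row = (grid_y // 3) * 3
--             start_col = (grid_x // 3) * 3
--             for i in range(3):
--                 for j in range(3):
--                     highlight_cells.add((start_row + i, start_col + j))  # Hình vuông 3x3
--
--             return highlight_cells
--     return set()  # Trả về một tập rỗng nếu không có ô nào được chọn
-- ===== SOURCE B (Python) =====
-- CELL_SIZE = 100
--
-- GRID_SIZE = 9
--
-- def handle_mouse_events(mouse_pos, fixed_cells):
--     grid_x = mouse_pos[0] // CELL_SIZE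
--     grid_y = mouse_pos[1] // CELL_SIZE
--     if not (0 <= grid_x < GRID_SIZE and 0 <= grid_y < GRID_SIZE):
--         return set()
--     if (grid_y, grid_x) in fixed_cells:
--         return set()
--     # crosshair membership filter: one scan over the whole grid
--     return {
--         (r, c)
--         for r in range(GRID_SIZE)
--         for c in range(GRID_SIZE)
--         if r == grid_y or c == grid_x
--         or (r // 3 == grid_y // 3 and c // 3 == grid_x // 3)
--     }
-- ===== Notes on version B (the rewrite author's own statement) =====
-- stated objective: alternative
-- what changed: Replaces A's three targeted accumulation loops (row loop, column loop, nested 3x3 box loop over computed start_row/start_col) with a single scan over all 81 cells that keeps a cell iff it lies on the crosshair row/column or in the same 3x3 box (r//3 == grid_y//3 and c//3 == grid_x//3).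
import Mathlib
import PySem

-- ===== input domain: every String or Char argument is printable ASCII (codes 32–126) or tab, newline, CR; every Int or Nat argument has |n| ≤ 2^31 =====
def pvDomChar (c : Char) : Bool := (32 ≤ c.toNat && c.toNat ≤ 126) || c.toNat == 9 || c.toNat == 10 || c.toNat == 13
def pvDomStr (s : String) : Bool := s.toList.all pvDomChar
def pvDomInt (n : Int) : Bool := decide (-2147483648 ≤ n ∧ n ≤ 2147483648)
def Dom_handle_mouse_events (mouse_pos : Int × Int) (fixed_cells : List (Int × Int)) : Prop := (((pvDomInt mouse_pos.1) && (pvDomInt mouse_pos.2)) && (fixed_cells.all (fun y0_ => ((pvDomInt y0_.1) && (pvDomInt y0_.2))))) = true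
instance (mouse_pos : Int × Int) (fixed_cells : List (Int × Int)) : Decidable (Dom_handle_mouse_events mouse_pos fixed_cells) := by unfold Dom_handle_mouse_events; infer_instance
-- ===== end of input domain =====

-- B replaces A's three targeted insertion loops (row, column, 3x3 box) by one scan of the
-- whole grid keeping exactly the crosshair/box cells; same return value, similar O(1) cost.
-- Both functions RETURN a Python set, whose iteration order is unobservable; both ports
-- therefore return the set's elements in the canonical (lexicographically sorted) order.
def pySetOut (s : PySem.Set (Int × Int)) : List (Int × Int) :=
  PySem.List.sorted s (fun p => toLex p)

-- ===== PORT A =====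
def handle_mouse_events (mouse_pos : Int × Int) (fixed_cells : List (Int × Int)) : List (Int × Int) :=
  let mouse_x := mouse_pos.1
  let mouse_y := mouse_pos.2
  let grid_x := PySem.Int.floordiv mouse_x 100
  let grid_y := PySem.Int.floordiv mouse_y 100
  if 0 ≤ grid_x ∧ grid_x < 9 ∧ 0 ≤ grid_y ∧ grid_y < 9 then
    if (grid_y, grid_x) ∉ fixed_cells then
      -- row/column loop: highlight_cells.add((grid_y, i)); highlight_cells.add((i, grid_x))
      let highlight_cells : PySem.Set (Int × Int) :=
        (PySem.List.pyRange 0 9).foldl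
          (fun s i => PySem.Set.add (PySem.Set.add s (grid_y, i)) (i, grid_x)) PySem.Set.empty
      let start_row := PySem.Int.floordiv grid_y 3 * 3
      let start_col := PySem.Int.floordiv grid_x 3 * 3
      -- 3x3 box double loop
      let highlight_cells :=
        (PySem.List.pyRange 0 3).foldl
          (fun s i => (PySem.List.pyRange 0 3).foldl
            (fun s j => PySem.Set.add s (start_row + i, start_col + j)) s) highlight_cells
      pySetOut highlight_cells
    else pySetOut PySem.Set.empty
  else pySetOut PySem.Set.empty

-- ===== PORT B =====
def handle_mouse_events_alt (mouse_pos : Int × Int) (fixed_cells : List (Int × Int)) : List (Int × Int) :=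
  let grid_x := PySem.Int.floordiv mouse_pos.1 100
  let grid_y := PySem.Int.floordiv mouse_pos.2 100
  if ¬ (0 ≤ grid_x ∧ grid_x < 9 ∧ 0 ≤ grid_y ∧ grid_y < 9) then pySetOut PySem.Set.empty
  else if (grid_y, grid_x) ∈ fixed_cells then pySetOut PySem.Set.empty
  else
    -- {(r, c) for r in range(9) for c in range(9) if r == grid_y or c == grid_x or (r//3 == grid_y//3 and c//3 == grid_x//3)}
    pySetOut (PySem.Set.ofList
      (((PySem.List.pyRange 0 9).flatMap
          (fun r => (PySem.List.pyRange 0 9).map (fun c => (r, c)))).filter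
        (fun rc => rc.1 == grid_y || rc.2 == grid_x ||
          (PySem.Int.floordiv rc.1 3 == PySem.Int.floordiv grid_y 3 &&
           PySem.Int.floordiv rc.2 3 == PySem.Int.floordiv grid_x 3))))

-- ===== PRECONDITION & SPEC =====
def Spec_handle_mouse_events (mouse_pos : Int × Int) (fixed_cells : List (Int × Int)) (out : List (Int × Int)) : Prop := out = handle_mouse_events_alt mouse_pos fixed_cells
instance (mouse_pos : Int × Int) (fixed_cells : List (Int × Int)) (out : List (Int × Int)) : Decidable (Spec_handle_mouse_events mouse_pos fixed_cells out) := by unfold Spec_handle_mouse_events; infer_instance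

-- ===== CLAIM (what is proved, stated in full; the proofs are below) =====
def Claim_equal_handle_mouse_events : Prop := ∀ (mouse_pos : Int × Int) (fixed_cells : List (Int × Int)), Dom_handle_mouse_events mouse_pos fixed_cells → Spec_handle_mouse_events mouse_pos fixed_cells (handle_mouse_events mouse_pos fixed_cells)

-- ===== LEMMAS AND PROOFS =====

-- A's row/column loop is plain set-accumulation of the flattened pair list
theorem foldl_add2_eq (l : List Int) (gy gx : Int) (s : PySem.Set (Int × Int)) :
    l.foldl (fun s i => PySem.Set.add (PySem.Set.add s (gy, i)) (i, gx)) s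
      = List.foldl PySem.Set.add s (l.flatMap (fun i => [(gy, i), (i, gx)])) := by
  induction l generalizing s with
  | nil => rfl
  | cons h t ih => simp only [List.foldl_cons, List.flatMap_cons, List.foldl_append, ih]; rfl

-- A's nested 3x3 loop is set-accumulation of the flattened box list
theorem foldl_box_eq (l : List Int) (g : Int → Int → (Int × Int)) (s : PySem.Set (Int × Int)) :
    l.foldl (fun s i => (PySem.List.pyRange 0 3).foldl
        (fun s j => PySem.Set.add s (g i j)) s) s
      = List.foldl PySem.Set.add s (l.flatMap (fun i => (PySem.List.pyRange 0 3).map (g i))) := by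
  induction l generalizing s with
  | nil => rfl
  | cons h t ih =>
    simp only [List.foldl_cons, List.flatMap_cons, List.foldl_append, ih, List.foldl_map]

-- the crosshair/box membership equivalence, under the in-grid guard
theorem mem_highlight_iff (gy gx p q : Int)
    (hx : 0 ≤ gx ∧ gx < 9) (hy : 0 ≤ gy ∧ gy < 9) :
    (p, q) ∈ ((PySem.List.pyRange 0 9).flatMap (fun i => [(gy, i), (i, gx)]) ++
        (PySem.List.pyRange 0 3).flatMap
          (fun i => (PySem.List.pyRange 0 3).map
            (fun j => (gy / 3 * 3 + i, gx / 3 * 3 + j))))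
      ↔ (p, q) ∈ (((PySem.List.pyRange 0 9).flatMap
            (fun r => (PySem.List.pyRange 0 9).map (fun c => (r, c)))).filter
          (fun rc => rc.1 == gy || rc.2 == gx ||
            (rc.1 / 3 == gy / 3 && rc.2 / 3 == gx / 3))) := by
  simp only [List.mem_append, List.mem_flatMap, List.mem_filter, List.mem_map,
    List.mem_cons, List.not_mem_nil, or_false, PySem.List.mem_pyRange_one,
    Bool.or_eq_true, Bool.and_eq_true, beq_iff_eq, Prod.mk.injEq]
  constructor
  · intro h
    rcases h with ⟨i, hi, hcase⟩ | ⟨i, hi, j, hj, hbox⟩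
    · rcases hcase with hA | hA <;>
        exact ⟨⟨p, by omega, q, by omega, rfl, rfl⟩, by omega⟩
    · exact ⟨⟨p, by omega, q, by omega, rfl, rfl⟩, by omega⟩
  · intro h
    obtain ⟨hgrid, hcond⟩ := h
    obtain ⟨r, hr, c, hc, h1, h2⟩ := hgrid
    by_cases hrow : p = gy
    · exact Or.inl ⟨q, by omega, Or.inl ⟨hrow, rfl⟩⟩
    by_cases hcol : q = gx
    · exact Or.inl ⟨p, by omega, Or.inr ⟨rfl, hcol⟩⟩
    have hb : p / 3 = gy / 3 ∧ q / 3 = gx / 3 := by tauto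
    exact Or.inr ⟨p - gy / 3 * 3, by omega, q - gx / 3 * 3, by omega, by omega, by omega⟩

-- ===== VERDICT (by name: the statement is the Claim_ definition above) =====
theorem handle_mouse_events_spec : Claim_equal_handle_mouse_events := by
  intro mp fc _
  unfold Spec_handle_mouse_events handle_mouse_events handle_mouse_events_alt
  simp only [PySem.Int.floordiv_eq_ediv_of_pos (b := (100 : Int)) (by norm_num),
    PySem.Int.floordiv_eq_ediv_of_pos (b := (3 : Int)) (by norm_num)]
  by_cases hG : 0 ≤ mp.1 / 100 ∧ mp.1 / 100 < 9 ∧ 0 ≤ mp.2 / 100 ∧ mp.2 / 100 < 9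
  · rw [if_pos hG, if_neg (not_not_intro hG)]
    by_cases hm : (mp.2 / 100, mp.1 / 100) ∈ fc
    · rw [if_neg (not_not_intro hm), if_pos hm]
    · rw [if_pos hm, if_neg hm]
      rw [foldl_add2_eq,
        foldl_box_eq (g := fun i j => (mp.2 / 100 / 3 * 3 + i, mp.1 / 100 / 3 * 3 + j)),
        ← List.foldl_append,
        show (PySem.Set.empty : PySem.Set (Int × Int)) = [] from rfl,
        ← PySem.Set.ofList_eq_foldl]
      unfold pySetOut
      apply PySem.List.sorted_eq_sorted_of_perm _ _ _ toLex.injective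
      rw [List.perm_ext_iff_of_nodup (PySem.Set.nodup_ofList _) (PySem.Set.nodup_ofList _)]
      intro a
      rw [PySem.Set.mem_ofList, PySem.Set.mem_ofList]
      obtain ⟨p, q⟩ := a
      exact mem_highlight_iff _ _ p q ⟨hG.1, hG.2.1⟩ ⟨hG.2.2.1, hG.2.2.2⟩
  · rw [if_neg hG, if_pos hG]
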